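-- pv_equiv track=rewrite | github.com/tangjiewei0336/ascii_choir | src/utils/accompaniment.py | expand_pattern_with_chord
-- ===== SOURCE A (Python) =====
-- def expand_pattern_with_chord(pattern_str: str, sorted_parts: list[str]) -> str:
--     """
--     将伴奏型中的 1、2、3、4 替换为和弦各音（简谱）。
--     保留括号、空格、_、-、~ 等结构。
--     """
--     if not sorted_parts:
--         return pattern_str
--     mapping = {str(i + 1): sorted_parts[i] for i in range(min(4, len(sorted_parts)))}
--     result: list[str] = []
--     i = 0
--     while i < len(pattern_str):
--         c = pattern_str[i]
--         if c in "1234" and (i + 1 >= len(pattern_str) or pattern_str[i + 1] not in "0123456789"):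
--             result.append(mapping.get(c, c))
--             i += 1
--         else:
--             result.append(c)
--             i += 1
--     return "".join(result)
-- ===== SOURCE B (Python) =====
-- def expand_pattern_with_chord(pattern_str: str, sorted_parts: list[str]) -> str:
--     """Single reverse pass with a 'next char is a digit' flag instead of index lookahead."""
--     if not sorted_parts:
--         return pattern_str
--     parts = sorted_parts[:4]
--     out = []
--     next_is_digit = False
--     for c in reversed(pattern_str):
--         idx = ord(c) - ord('1')
--         if not next_is_digit and 0 <= idx <= 3 and idx < len(parts):
--             out.append(parts[idx])
--         else:
--             out.append(c)
--         next_is_digit = '0' <= c <= '9'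
--     return ''.join(reversed(out))
-- ===== Notes on version B (the rewrite author's own statement) =====
-- stated objective: alternative
-- what changed: Replaces A's forward index loop with an i+1 lookahead and a str(i+1)-keyed dict by a single reverse pass that carries a 'next char is a digit' flag and indexes the chord list directly by ord(c)-ord('1').
import Mathlib
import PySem

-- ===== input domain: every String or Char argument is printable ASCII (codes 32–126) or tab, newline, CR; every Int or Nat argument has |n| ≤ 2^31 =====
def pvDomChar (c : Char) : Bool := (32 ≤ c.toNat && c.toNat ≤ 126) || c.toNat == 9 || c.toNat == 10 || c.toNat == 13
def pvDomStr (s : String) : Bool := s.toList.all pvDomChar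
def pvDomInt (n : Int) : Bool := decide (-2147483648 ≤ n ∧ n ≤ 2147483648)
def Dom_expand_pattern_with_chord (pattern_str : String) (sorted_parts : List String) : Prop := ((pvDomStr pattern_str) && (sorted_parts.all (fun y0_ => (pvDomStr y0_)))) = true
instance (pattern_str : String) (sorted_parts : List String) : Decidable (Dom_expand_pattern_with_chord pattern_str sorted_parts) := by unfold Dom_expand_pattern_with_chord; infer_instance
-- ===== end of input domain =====

-- B replaces A's forward index loop with lookahead (and its digit→part dict) by a single
-- reverse pass carrying a "next char is a digit" flag and direct list indexing (objective: alternative).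

-- ===== PORT A =====
-- mapping = {str(i + 1): sorted_parts[i] for i in range(min(4, len(sorted_parts)))}
def pvMappingA (sorted_parts : List String) : PySem.Dict String String :=
  (PySem.List.pyRange 0 (min 4 (sorted_parts.length : Int)) 1).foldl
    (fun d i => d.insert (PySem.Int.toStr (i + 1)) (PySem.List.pyGetD sorted_parts i ""))
    PySem.Dict.empty

-- the while loop over i, with the lookahead at pattern_str[i+1] read off the rest of the list;
-- Python's `c in "1234"` on a 1-char c is exactly char membership in ['1','2','3','4']
def pvLoopA (m : PySem.Dict String String) : List Char → List String
  | [] => []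
  | c :: rest =>
      (if (['1', '2', '3', '4'].contains c)
          && (match rest with
              | [] => true
              | d :: _ => !(['0','1','2','3','4','5','6','7','8','9'].contains d))
       then m.getD (String.singleton c) (String.singleton c)
       else String.singleton c) :: pvLoopA m rest

def expand_pattern_with_chord (pattern_str : String) (sorted_parts : List String) : String :=
  if sorted_parts = [] then pattern_str
  else PySem.Str.join "" (pvLoopA (pvMappingA sorted_parts) pattern_str.toList)

-- ===== PORT B =====
def pvItemB (parts : List String) (nextDig : Bool) (c : Char) : String :=
  let idx : Int := (c.toNat : Int) - ('1'.toNat : Int)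
  if !nextDig && decide (0 ≤ idx) && decide (idx ≤ 3) && decide (idx < (parts.length : Int))
  then parts.getD idx.toNat (String.singleton c)
  else String.singleton c

def pvStepB (parts : List String) (st : Bool × List String) (c : Char) : Bool × List String :=
  (decide ('0' ≤ c ∧ c ≤ '9'), st.2 ++ [pvItemB parts st.1 c])

def expand_pattern_with_chord_alt (pattern_str : String) (sorted_parts : List String) : String :=
  if sorted_parts = [] then pattern_str
  else
    let parts := sorted_parts.take 4
    let out := (pattern_str.toList.reverse.foldl (pvStepB parts) (false, [])).2
    PySem.Str.join "" out.reverse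

-- ===== PRECONDITION & SPEC =====
def Spec_expand_pattern_with_chord (pattern_str : String) (sorted_parts : List String) (out : String) : Prop := out = expand_pattern_with_chord_alt pattern_str sorted_parts
instance (pattern_str : String) (sorted_parts : List String) (out : String) : Decidable (Spec_expand_pattern_with_chord pattern_str sorted_parts out) := by unfold Spec_expand_pattern_with_chord; infer_instance

-- ===== CLAIM (what is proved, stated in full; the proofs are below) =====
def Claim_equal_expand_pattern_with_chord : Prop := ∀ (pattern_str : String) (sorted_parts : List String), Dom_expand_pattern_with_chord pattern_str sorted_parts → Spec_expand_pattern_with_chord pattern_str sorted_parts (expand_pattern_with_chord pattern_str sorted_parts)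

-- ===== LEMMAS AND PROOFS =====

-- B's reverse fold, re-expressed from the left: the flag fed to each char is the digit-test
-- of the char that follows it (d is the flag to the right of the whole list)
def pvListB (parts : List String) : List Char → Bool → List String
  | [], _ => []
  | c :: rest, d =>
      pvItemB parts (match rest with | [] => d | e :: _ => decide ('0' ≤ e ∧ e ≤ '9')) c
        :: pvListB parts rest d

lemma foldB (parts : List String) (l : List Char) (d : Bool) (acc : List String) :
    l.reverse.foldl (pvStepB parts) (d, acc) =
      ((match l with | [] => d | c :: _ => decide ('0' ≤ c ∧ c ≤ '9')),
        acc ++ (pvListB parts l d).reverse) := by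
  induction l generalizing d acc with
  | nil => simp [pvListB]
  | cons c rest ih =>
      simp only [List.reverse_cons, List.foldl_append, ih, pvListB, List.foldl_cons,
        List.foldl_nil, pvStepB, List.reverse_cons]
      cases rest <;> simp

lemma dig_eq (c : Char) :
    (['0','1','2','3','4','5','6','7','8','9'].contains c) = decide ('0' ≤ c ∧ c ≤ '9') := by
  rw [Bool.eq_iff_iff]
  simp [List.contains_eq_mem, Char.ext_iff, ← UInt32.toNat_inj, Char.le_def,
    UInt32.le_iff_toNat_le]
  omega

lemma mem1234_eq (c : Char) :
    (['1','2','3','4'].contains c)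
      = (decide (0 ≤ (c.toNat : Int) - ('1'.toNat : Int))
          && decide ((c.toNat : Int) - ('1'.toNat : Int) ≤ 3)) := by
  rw [Bool.eq_iff_iff]
  simp [List.contains_eq_mem, Char.ext_iff, ← UInt32.toNat_inj]
  omega

lemma mapping_eq (sorted_parts : List String) (c : Char)
    (hc : (['1','2','3','4'].contains c) = true) :
    (pvMappingA sorted_parts).getD (String.singleton c) (String.singleton c)
      = (if ((c.toNat : Int) - ('1'.toNat : Int) < ((sorted_parts.take 4).length : Int))
         then (sorted_parts.take 4).getD ((c.toNat : Int) - ('1'.toNat : Int)).toNat (String.singleton c)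
         else String.singleton c) := by
  have h1 : PySem.Int.toStr 1 = "1" := by decide
  have h2 : PySem.Int.toStr 2 = "2" := by decide
  have h3 : PySem.Int.toStr 3 = "3" := by decide
  have h4 : PySem.Int.toStr 4 = "4" := by decide
  have hc' : c = '1' ∨ c = '2' ∨ c = '3' ∨ c = '4' := by
    simpa [List.contains_eq_mem] using hc
  rcases sorted_parts with _ | ⟨a, _ | ⟨b, _ | ⟨e, _ | ⟨f, t⟩⟩⟩⟩
  · unfold pvMappingA
    rcases hc' with rfl | rfl | rfl | rfl <;>
      simp [PySem.Dict.getD, PySem.Dict.get?, PySem.Dict.empty]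
  · unfold pvMappingA
    have hm : min 4 (([a].length : Nat) : Int) = 1 := by simp
    rw [hm, (by decide : PySem.List.pyRange 0 1 1 = [0])]
    rcases hc' with rfl | rfl | rfl | rfl <;>
      simp [PySem.Dict.getD, PySem.Dict.get?, PySem.Dict.insert, PySem.Dict.empty,
        PySem.List.pyGetD_ofNat', String.singleton, h1]
  · unfold pvMappingA
    have hm : min 4 (([a,b].length : Nat) : Int) = 2 := by simp
    rw [hm, (by decide : PySem.List.pyRange 0 2 1 = [0,1])]
    rcases hc' with rfl | rfl | rfl | rfl <;>
      simp [PySem.Dict.getD, PySem.Dict.get?, PySem.Dict.insert, PySem.Dict.empty,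
        PySem.List.pyGetD_ofNat', String.singleton, h1, h2]
  · unfold pvMappingA
    have hm : min 4 (([a,b,e].length : Nat) : Int) = 3 := by simp
    rw [hm, (by decide : PySem.List.pyRange 0 3 1 = [0,1,2])]
    rcases hc' with rfl | rfl | rfl | rfl <;>
      simp [PySem.Dict.getD, PySem.Dict.get?, PySem.Dict.insert, PySem.Dict.empty,
        PySem.List.pyGetD_ofNat', String.singleton, h1, h2, h3]
  · unfold pvMappingA
    have hm : min 4 (((a :: b :: e :: f :: t).length : Nat) : Int) = 4 := by simp; omega
    rw [hm, (by decide : PySem.List.pyRange 0 4 1 = [0,1,2,3])]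
    rcases hc' with rfl | rfl | rfl | rfl <;>
      simp [PySem.Dict.getD, PySem.Dict.get?, PySem.Dict.insert, PySem.Dict.empty,
        PySem.List.pyGetD_ofNat', String.singleton, h1, h2, h3, h4]

lemma itemB_eq (sp : List String) (nd : Bool) (c : Char) :
    pvItemB (sp.take 4) nd c
      = (if (['1','2','3','4'].contains c) && !nd
         then (pvMappingA sp).getD (String.singleton c) (String.singleton c)
         else String.singleton c) := by
  by_cases hc : (['1','2','3','4'].contains c) = true
  · rw [mapping_eq sp c hc, hc]
    have h := mem1234_eq c
    rw [hc] at h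
    obtain ⟨hd1, hd2⟩ := Bool.and_eq_true_iff.mp h.symm
    cases nd
    · simp only [pvItemB, hd1, hd2, Bool.not_false, Bool.true_and, Bool.and_true,
        decide_eq_true_eq]
      simp
    · simp only [pvItemB, Bool.not_true, Bool.false_and, Bool.and_false,
        Bool.false_eq_true, if_false]
  · rw [Bool.not_eq_true] at hc
    rw [hc]
    have h := mem1234_eq c
    rw [hc] at h
    rcases Bool.and_eq_false_iff.mp h.symm with h' | h' <;>
      simp only [pvItemB, h', Bool.and_false, Bool.false_and, Bool.false_eq_true,
        if_false]

lemma listB_eq_loopA (sorted_parts : List String) (l : List Char) :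
    pvListB (sorted_parts.take 4) l false = pvLoopA (pvMappingA sorted_parts) l := by
  induction l with
  | nil => rfl
  | cons c rest ih =>
      refine congrArg₂ List.cons ?_ ih
      rw [itemB_eq]
      cases rest with
      | nil => simp
      | cons d rest' => simp only [dig_eq]

-- ===== VERDICT (by name: the statement is the Claim_ definition above) =====
theorem expand_pattern_with_chord_spec : Claim_equal_expand_pattern_with_chord := by
  intro p sp _
  unfold Spec_expand_pattern_with_chord expand_pattern_with_chord expand_pattern_with_chord_alt
  by_cases h : sp = []
  · simp [h]
  · simp only [h, foldB, List.reverse_reverse, List.nil_append, listB_eq_loopA]
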